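-- pv_equiv track=rewrite | github.com/meanwo/TIL | SWEA/Greedy/베이비진 게임.py | is_run
-- ===== SOURCE A (Python) =====
-- def is_run(list0):
--     flag = 0
--     list0 = list(set(list0))
--     list0 = sorted(list0)
--     if len(list0) >= 3:
--         for i in range(len(list0)-2):
--             if list0[i]+2 == list0[i+1]+1 == list0[i+2]:
--                 flag = 1
--                 break
--     if flag == 1:
--         return 1
--     else:
--         return 0
-- ===== SOURCE B (Python) =====
-- def is_run(list0):
--     s = set(list0)
--     return 1 if any(v + 1 in s and v + 2 in s for v in s) else 0
-- ===== Notes on version B (the rewrite author's own statement) =====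
-- stated objective: idiomatic
-- what changed: Replaces dedup-sort-and-slide-a-window-of-3 with a single set built once and an any() over it testing membership of v+1 and v+2.
import Mathlib
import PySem

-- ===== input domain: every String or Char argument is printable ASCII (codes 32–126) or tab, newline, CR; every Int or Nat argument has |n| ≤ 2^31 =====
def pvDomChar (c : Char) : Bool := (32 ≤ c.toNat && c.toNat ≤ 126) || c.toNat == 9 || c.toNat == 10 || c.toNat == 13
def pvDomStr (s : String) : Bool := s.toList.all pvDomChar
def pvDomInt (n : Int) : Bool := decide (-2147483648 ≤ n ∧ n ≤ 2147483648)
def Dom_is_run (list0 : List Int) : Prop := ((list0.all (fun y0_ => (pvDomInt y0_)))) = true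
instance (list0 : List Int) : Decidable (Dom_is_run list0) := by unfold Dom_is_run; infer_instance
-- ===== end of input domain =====

-- B replaces A's dedup-sort-and-slide-a-window-of-3 by one set and an any() of membership tests (idiomatic).

-- ===== PORT A =====
-- the 'for i in range(len(list0)-2): … break' loop, recursing over the range list (break = stop at first hit);
-- every index the loop touches is in range, so xs[i] is ported as pyGetD with an arbitrary default
def isRunLoopA (l : List Int) : List Int → Int
  | [] => 0
  | i :: rest =>
    if PySem.List.pyGetD l i 0 + 2 = PySem.List.pyGetD l (i + 1) 0 + 1 ∧
       PySem.List.pyGetD l (i + 1) 0 + 1 = PySem.List.pyGetD l (i + 2) 0 then 1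
    else isRunLoopA l rest

def is_run (list0 : List Int) : Int :=
  -- flag = 0; list0 = list(set(list0)); list0 = sorted(list0)
  let l1 : List Int := PySem.Set.ofList list0
  let l : List Int := PySem.List.sorted l1 (fun x => x) false
  let flag : Int :=
    if 3 ≤ l.length then isRunLoopA l (PySem.List.pyRange 0 ((l.length : Int) - 2) 1) else 0
  if flag = 1 then 1 else 0

-- ===== PORT B =====
def is_run_alt (list0 : List Int) : Int :=
  let s : PySem.Set Int := PySem.Set.ofList list0
  if s.any (fun v => PySem.Set.contains s (v + 1) && PySem.Set.contains s (v + 2)) then 1 else 0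

-- ===== PRECONDITION & SPEC =====
def Spec_is_run (list0 : List Int) (out : Int) : Prop := out = is_run_alt list0
instance (list0 : List Int) (out : Int) : Decidable (Spec_is_run list0 out) := by unfold Spec_is_run; infer_instance

-- ===== CLAIM (what is proved, stated in full; the proofs are below) =====
def Claim_equal_is_run : Prop := ∀ (list0 : List Int), Dom_is_run list0 → Spec_is_run list0 (is_run list0)

-- ===== LEMMAS AND PROOFS =====

-- the break-loop returns 1 iff some index in the iterated range satisfies the window test
theorem isRunLoopA_eq_one_iff (l r : List Int) :
    isRunLoopA l r = 1 ↔ ∃ i ∈ r,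
      PySem.List.pyGetD l i 0 + 2 = PySem.List.pyGetD l (i + 1) 0 + 1 ∧
      PySem.List.pyGetD l (i + 1) 0 + 1 = PySem.List.pyGetD l (i + 2) 0 := by
  induction r with
  | nil => simp [isRunLoopA]
  | cons i rest ih =>
    by_cases h : PySem.List.pyGetD l i 0 + 2 = PySem.List.pyGetD l (i + 1) 0 + 1 ∧
        PySem.List.pyGetD l (i + 1) 0 + 1 = PySem.List.pyGetD l (i + 2) 0
    · simp [isRunLoopA, h]
    · simp only [isRunLoopA, if_neg h, ih, List.mem_cons]
      constructor
      · rintro ⟨j, hj, hc⟩; exact ⟨j, Or.inr hj, hc⟩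
      · rintro ⟨j, hj | hj, hc⟩
        · exact absurd (hj ▸ hc) h
        · exact ⟨j, hj, hc⟩

theorem isRunLoopA_zero_or_one (l r : List Int) : isRunLoopA l r = 0 ∨ isRunLoopA l r = 1 := by
  induction r with
  | nil => left; rfl
  | cons i rest ih =>
    by_cases h : PySem.List.pyGetD l i 0 + 2 = PySem.List.pyGetD l (i + 1) 0 + 1 ∧
        PySem.List.pyGetD l (i + 1) 0 + 1 = PySem.List.pyGetD l (i + 2) 0
    · right; simp [isRunLoopA, h]
    · simp [isRunLoopA, h]
      exact ih

-- in a strictly increasing Int list, an element equal to l[j]+1 sits at index j+1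
theorem adj_index (l : List Int) (hp : l.Pairwise (· < ·)) {j k : Nat}
    (hj : j < l.length) (hk : k < l.length) (h : l[k] = l[j] + 1) : k = j + 1 := by
  rw [List.pairwise_iff_getElem] at hp
  rcases lt_trichotomy k (j + 1) with hlt | heq | hgt
  · rcases Nat.lt_or_ge k j with h1 | h1
    · have := hp k j hk hj h1; omega
    · have : k = j := by omega
      subst this; omega
  · exact heq
  · have hj1 : j + 1 < l.length := by omega
    have h1 := hp j (j + 1) hj (by omega) (by omega)
    have h2 := hp (j + 1) k hj1 hk hgt
    omega

-- pyGetD at a natural index in range is getElem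
theorem pyGetD_nat (l : List Int) (n : Nat) (hn : n < l.length) :
    PySem.List.pyGetD l (n : Int) 0 = l[n] := by
  rw [PySem.List.pyGetD_natCast, List.getD_eq_getElem l 0 hn]

-- the sorted-window test on the strictly increasing l is equivalent to the pure membership test
theorem window_iff_mem (l : List Int) (hp : l.Pairwise (· < ·)) :
    (3 ≤ l.length ∧ ∃ i ∈ PySem.List.pyRange 0 ((l.length : Int) - 2) 1,
      PySem.List.pyGetD l i 0 + 2 = PySem.List.pyGetD l (i + 1) 0 + 1 ∧
      PySem.List.pyGetD l (i + 1) 0 + 1 = PySem.List.pyGetD l (i + 2) 0)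
    ↔ ∃ v ∈ l, v + 1 ∈ l ∧ v + 2 ∈ l := by
  constructor
  · rintro ⟨hlen, i, hi, h1, h2⟩
    rw [PySem.List.mem_pyRange_one] at hi
    obtain ⟨n, rfl⟩ : ∃ n : Nat, i = (n : Int) := ⟨i.toNat, (Int.toNat_of_nonneg hi.1).symm⟩
    have hn2 : n + 2 < l.length := by
      have := hi.2; omega
    have c1 : ((n : Int) + 1) = ((n + 1 : Nat) : Int) := by push_cast; ring
    have c2 : ((n : Int) + 2) = ((n + 2 : Nat) : Int) := by push_cast; ring
    rw [c1] at h1 h2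
    rw [c2] at h2
    rw [pyGetD_nat l n (by omega), pyGetD_nat l (n+1) (by omega)] at h1
    rw [pyGetD_nat l (n+1) (by omega), pyGetD_nat l (n+2) (by omega)] at h2
    refine ⟨l[n], List.getElem_mem _, ?_, ?_⟩
    · have : l[n] + 1 = l[n+1] := by omega
      rw [this]; exact List.getElem_mem _
    · have : l[n] + 2 = l[n+2] := by omega
      rw [this]; exact List.getElem_mem _
  · rintro ⟨v, hv, hv1, hv2⟩
    rcases List.mem_iff_getElem.mp hv with ⟨j, hj, rfl⟩
    rcases List.mem_iff_getElem.mp hv1 with ⟨k, hk, hkv⟩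
    rcases List.mem_iff_getElem.mp hv2 with ⟨m, hm, hmv⟩
    have hkj : k = j + 1 := adj_index l hp hj hk hkv
    have hmk : m = k + 1 := by
      apply adj_index l hp hk hm
      rw [hmv, hkv]; ring
    have hmj : m = j + 2 := by omega
    subst hkj; subst hmj
    have hlen : j + 2 < l.length := hm
    refine ⟨by omega, (j : Int), ?_, ?_⟩
    · rw [PySem.List.mem_pyRange_one]
      exact ⟨Int.natCast_nonneg j, by omega⟩
    · have c1 : ((j : Int) + 1) = ((j + 1 : Nat) : Int) := by push_cast; ring
      have c2 : ((j : Int) + 2) = ((j + 2 : Nat) : Int) := by push_cast; ring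
      rw [pyGetD_nat l j (by omega), c1, c2, pyGetD_nat l (j+1) (by omega),
          pyGetD_nat l (j+2) (by omega)]
      rw [hkv, hmv]; omega

theorem set_contains_iff (xs : List Int) (x : Int) :
    PySem.Set.contains (PySem.Set.ofList xs) x = true ↔ x ∈ xs := by
  simp [PySem.Set.contains, PySem.Set.mem_ofList]

-- ===== VERDICT (by name: the statement is the Claim_ definition above) =====
theorem is_run_spec : Claim_equal_is_run := by
  intro list0 _
  unfold Spec_is_run is_run is_run_alt
  simp only []
  set l1 : List Int := PySem.Set.ofList list0 with hl1
  set l : List Int := PySem.List.sorted l1 (fun x => x) false with hl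
  have hmem : ∀ x : Int, x ∈ l ↔ x ∈ list0 := by
    intro x
    rw [hl, PySem.List.mem_sorted, hl1]
    exact PySem.Set.mem_ofList list0 x
  have hp : l.Pairwise (· < ·) := PySem.List.sorted_ofList_pairwise_lt list0
  have hB : (l1.any
      (fun v => PySem.Set.contains l1 (v + 1) && PySem.Set.contains l1 (v + 2)) = true)
      ↔ ∃ v ∈ list0, v + 1 ∈ list0 ∧ v + 2 ∈ list0 := by
    rw [List.any_eq_true]
    constructor
    · rintro ⟨v, hv, hc⟩
      rw [Bool.and_eq_true, hl1] at hc
      rw [hl1] at hv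
      rw [set_contains_iff, set_contains_iff] at hc
      exact ⟨v, (PySem.Set.mem_ofList list0 v).mp hv, hc⟩
    · rintro ⟨v, hv, h1, h2⟩
      refine ⟨v, ?_, ?_⟩
      · rw [hl1]; exact (PySem.Set.mem_ofList list0 v).mpr hv
      · rw [Bool.and_eq_true, hl1, set_contains_iff, set_contains_iff]
        exact ⟨h1, h2⟩
  by_cases hE : ∃ v ∈ list0, v + 1 ∈ list0 ∧ v + 2 ∈ list0
  · -- both sides return 1
    have hE' : ∃ v ∈ l, v + 1 ∈ l ∧ v + 2 ∈ l := by
      rcases hE with ⟨v, hv, h1, h2⟩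
      exact ⟨v, (hmem v).mpr hv, (hmem _).mpr h1, (hmem _).mpr h2⟩
    rcases (window_iff_mem l hp).mpr hE' with ⟨hlen, hwin⟩
    rw [if_pos hlen, if_pos ((isRunLoopA_eq_one_iff _ _).mpr hwin), if_pos (hB.mpr hE)]
  · -- both sides return 0
    rw [if_neg (fun h => hE (hB.mp h))]
    have hnot : ¬ (3 ≤ l.length ∧ ∃ i ∈ PySem.List.pyRange 0 ((l.length : Int) - 2) 1,
        PySem.List.pyGetD l i 0 + 2 = PySem.List.pyGetD l (i + 1) 0 + 1 ∧
        PySem.List.pyGetD l (i + 1) 0 + 1 = PySem.List.pyGetD l (i + 2) 0) := by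
      intro h
      rcases (window_iff_mem l hp).mp h with ⟨v, hv, h1, h2⟩
      exact hE ⟨v, (hmem v).mp hv, (hmem _).mp h1, (hmem _).mp h2⟩
    by_cases hlen : 3 ≤ l.length
    · rw [if_pos hlen]
      rcases isRunLoopA_zero_or_one l (PySem.List.pyRange 0 ((l.length : Int) - 2) 1) with h0 | h1
      · rw [h0]; norm_num
      · exact absurd ⟨hlen, (isRunLoopA_eq_one_iff _ _).mp h1⟩ hnot
    · rw [if_neg hlen]; norm_num
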